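-- pv_equiv track=rewrite | github.com/whale0k/Nessus_zh_report | utils/statistics.py | calculate_host_risk_from_levels
-- ===== SOURCE A (Python) =====
-- from typing import Dict, List, Tuple, Any
--
-- def calculate_host_risk_from_levels(risk_levels: List[str]) -> Tuple[float, str]:
--     """Calculate host risk based on vulnerability risk levels (simplified version)"""
--     if not risk_levels:
--         return 0, "安全"
--
--     level_count = {'Critical': 0, 'High': 0, 'Medium': 0, 'Low': 0, 'Info': 0, 'None': 0}
--     for level in risk_levels:
--         if level in level_count:
--             level_count[level] += 1
--         else:
--             level_count['Info'] += 1
--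
--     if level_count['Critical'] > 0:
--         risk_score = 100
--         risk_level = "超危"
--     elif level_count['High'] > 0:
--         risk_score = min(85 + level_count['High'] * 3, 99)
--         risk_level = "高危"
--     elif level_count['Medium'] > 0:
--         risk_score = min(60 + level_count['Medium'] * 2, 84)
--         risk_level = "中危"
--     elif level_count['Low'] > 0:
--         risk_score = min(30 + level_count['Low'], 59)
--         risk_level = "低危"
--     else:
--         risk_score = 0
--         risk_level = "安全"
--
--     return risk_score, risk_level
-- ===== SOURCE B (Python) =====
-- def calculate_host_risk_from_levels(risk_levels):
--     """Calculate host risk based on vulnerability risk levels (simplified version)"""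
--     # Single pass tracking the highest severity rank seen and how many entries have it.
--     best = cnt = 0
--     for level in risk_levels:
--         r = (4 if level == 'Critical' else 3 if level == 'High' else
--              2 if level == 'Medium' else 1 if level == 'Low' else 0)
--         if r > best:
--             best, cnt = r, 1
--         elif r == best:
--             cnt += 1
--     if best == 0:
--         return 0, '安全'
--     base, mult, cap, label = (
--         (30, 1, 59, '低危'), (60, 2, 84, '中危'),
--         (85, 3, 99, '高危'), (100, 0, 100, '超危'))[best - 1]
--     return min(base + cnt * mult, cap), label
-- ===== Notes on version B (the rewrite author's own statement) =====
-- stated objective: alternative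
-- what changed: Replaces A's per-level counting dict plus four separate scoring branches by a single-pass argmax accumulator (highest severity rank seen, and how many entries carry it), then one table-indexed min(base+cnt*mult,cap) formula from that pair.
import Mathlib
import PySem

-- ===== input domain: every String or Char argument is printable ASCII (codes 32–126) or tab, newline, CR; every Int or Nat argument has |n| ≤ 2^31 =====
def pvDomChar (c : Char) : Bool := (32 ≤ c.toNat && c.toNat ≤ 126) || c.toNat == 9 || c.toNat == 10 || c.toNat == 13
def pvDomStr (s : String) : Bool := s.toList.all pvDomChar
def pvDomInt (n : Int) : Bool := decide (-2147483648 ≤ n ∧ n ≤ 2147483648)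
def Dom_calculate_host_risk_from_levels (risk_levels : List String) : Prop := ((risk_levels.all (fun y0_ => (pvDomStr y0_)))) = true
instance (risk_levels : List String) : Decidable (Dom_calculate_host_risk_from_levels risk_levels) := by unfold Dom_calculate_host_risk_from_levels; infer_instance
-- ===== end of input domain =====

-- B replaces A's counting dict and four scoring branches by a single-pass argmax accumulator
-- (highest severity rank seen and how many entries carry it) plus one table-indexed
-- min(base+cnt*mult,cap) formula (objective: alternative decomposition, same cost).

-- ===== PORT A =====
def pvInitDict : PySem.Dict String Int :=
  PySem.Dict.ofList [("Critical", 0), ("High", 0), ("Medium", 0), ("Low", 0), ("Info", 0), ("None", 0)]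

def calculate_host_risk_from_levels (risk_levels : List String) : Int × String :=
  if risk_levels = [] then (0, "安全")
  else
    let lc := risk_levels.foldl
      (fun d level =>
        if d.contains level then d.modify level 0 (fun v => v + 1)
        else d.modify "Info" 0 (fun v => v + 1)) pvInitDict
    if lc.getD "Critical" 0 > 0 then (100, "超危")
    else if lc.getD "High" 0 > 0 then (min (85 + lc.getD "High" 0 * 3) 99, "高危")
    else if lc.getD "Medium" 0 > 0 then (min (60 + lc.getD "Medium" 0 * 2) 84, "中危")
    else if lc.getD "Low" 0 > 0 then (min (30 + lc.getD "Low" 0) 59, "低危")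
    else (0, "安全")

-- ===== PORT B =====
def pvRank (level : String) : Int :=
  if level = "Critical" then 4 else if level = "High" then 3
  else if level = "Medium" then 2 else if level = "Low" then 1 else 0

def pvStep (st : Int × Int) (level : String) : Int × Int :=
  let r := pvRank level
  if r > st.1 then (r, 1) else if r = st.1 then (st.1, st.2 + 1) else st

def pvTiers : List (Int × Int × Int × String) :=
  [(30, 1, 59, "低危"), (60, 2, 84, "中危"), (85, 3, 99, "高危"), (100, 0, 100, "超危")]

def calculate_host_risk_from_levels_alt (risk_levels : List String) : Int × String :=
  let bc := risk_levels.foldl pvStep (0, 0)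
  if bc.1 = 0 then (0, "安全")
  else
    match PySem.List.pyGet? pvTiers (bc.1 - 1) with
    | some (base, mult, cap, label) => (min (base + bc.2 * mult) cap, label)
    | none => (0, "安全")  -- unreachable: bc.1 ∈ {1,2,3,4}; total-form guard only

-- ===== PRECONDITION & SPEC =====
def Spec_calculate_host_risk_from_levels (risk_levels : List String) (out : Int × String) : Prop := out = calculate_host_risk_from_levels_alt risk_levels
instance (risk_levels : List String) (out : Int × String) : Decidable (Spec_calculate_host_risk_from_levels risk_levels out) := by unfold Spec_calculate_host_risk_from_levels; infer_instance

-- ===== CLAIM (what is proved, stated in full; the proofs are below) =====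
def Claim_equal_calculate_host_risk_from_levels : Prop := ∀ (risk_levels : List String), Dom_calculate_host_risk_from_levels risk_levels → Spec_calculate_host_risk_from_levels risk_levels (calculate_host_risk_from_levels risk_levels)

-- ===== LEMMAS AND PROOFS =====

-- max rank occurring in the list (0 for the empty list)
def pvM (ls : List String) : Int := ls.foldr (fun l m => max (pvRank l) m) 0

-- number of entries whose rank is r
def pvC (ls : List String) (r : Int) : Int := (ls.countP (fun l => pvRank l = r) : Int)

lemma pvM_cons (l : String) (ls : List String) : pvM (l :: ls) = max (pvRank l) (pvM ls) := by
  simp [pvM]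

lemma pvRank_bounds (l : String) : 0 ≤ pvRank l ∧ pvRank l ≤ 4 := by
  unfold pvRank; split_ifs <;> norm_num

lemma pvC_nonneg (ls : List String) (r : Int) : 0 ≤ pvC ls r := Int.natCast_nonneg _

lemma pvM_nonneg (ls : List String) : 0 ≤ pvM ls := by
  induction ls with
  | nil => simp [pvM]
  | cons l ls ih => rw [pvM_cons]; omega

lemma pvM_le_four (ls : List String) : pvM ls ≤ 4 := by
  induction ls with
  | nil => simp [pvM]
  | cons l ls ih =>
    rw [pvM_cons]
    have := (pvRank_bounds l).2
    omega

lemma pvC_cons (l : String) (ls : List String) (r : Int) :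
    pvC (l :: ls) r = (if pvRank l = r then 1 else 0) + pvC ls r := by
  simp only [pvC, List.countP_cons]
  split_ifs with h <;> simp_all <;> push_cast <;> omega

lemma pvC_zero_of_gt (ls : List String) (r : Int) (h : pvM ls < r) : pvC ls r = 0 := by
  induction ls with
  | nil => simp [pvC]
  | cons l ls ih =>
    rw [pvM_cons] at h
    rw [pvC_cons, if_neg (by omega), ih (by omega)]
    omega

lemma pvC_pos_of_ne_nil (ls : List String) (h : ls ≠ []) : 0 < pvC ls (pvM ls) := by
  induction ls with
  | nil => exact absurd rfl h
  | cons l ls ih =>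
    rw [pvC_cons]
    have hr := pvRank_bounds l
    by_cases hl : pvRank l = pvM (l :: ls)
    · rw [if_pos hl]
      have := pvC_nonneg ls (pvM (l :: ls))
      omega
    · rw [pvM_cons] at hl ⊢
      rw [if_neg hl]
      have hMe : max (pvRank l) (pvM ls) = pvM ls := by omega
      rw [hMe]
      have hne : ls ≠ [] := by
        intro hnil; subst hnil
        simp only [pvM, List.foldr_nil] at hl hMe
        omega
      have := ih hne
      omega


lemma pv_fold_char (ls : List String) (b c : Int) (hb : 0 ≤ b) :
    ls.foldl pvStep (b, c) =
      (max b (pvM ls), if b < pvM ls then pvC ls (pvM ls) else c + pvC ls b) := by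
  induction ls generalizing b c with
  | nil =>
    simp only [List.foldl_nil, pvM, List.foldr_nil, pvC, List.countP_nil, Nat.cast_zero,
      add_zero, Prod.mk.injEq]
    refine ⟨by omega, by rw [if_neg (show ¬ b < 0 from by omega)]⟩
  | cons l ls ih =>
    simp only [List.foldl_cons]
    have hr := pvRank_bounds l
    have hMn := pvM_nonneg ls
    rw [pvM_cons]
    by_cases h1 : pvRank l > b
    · rw [show pvStep (b, c) l = (pvRank l, 1) from by simp [pvStep, h1]]
      rw [ih _ _ (by omega)]
      simp only [Prod.mk.injEq]
      refine ⟨by omega, ?_⟩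
      by_cases h2 : pvRank l < pvM ls
      · rw [show max (pvRank l) (pvM ls) = pvM ls from by omega]
        rw [if_pos h2, if_pos (show b < pvM ls from by omega),
            pvC_cons, if_neg (show ¬ pvRank l = pvM ls from by omega)]
        omega
      · rw [show max (pvRank l) (pvM ls) = pvRank l from by omega]
        rw [if_neg h2, if_pos (show b < pvRank l from by omega),
            pvC_cons, if_pos rfl]
    · rw [show pvStep (b, c) l = (b, if pvRank l = b then c + 1 else c) from by
          simp only [pvStep]
          rw [if_neg (show ¬ pvRank l > b from by omega)]
          split_ifs with hx <;> simp_all]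
      rw [ih _ _ hb]
      simp only [Prod.mk.injEq]
      refine ⟨by omega, ?_⟩
      by_cases h2 : b < pvM ls
      · rw [if_pos h2, if_pos (show b < max (pvRank l) (pvM ls) from by omega),
            show max (pvRank l) (pvM ls) = pvM ls from by omega,
            pvC_cons, if_neg (show ¬ pvRank l = pvM ls from by omega)]
        omega
      · rw [if_neg h2, if_neg (show ¬ b < max (pvRank l) (pvM ls) from by omega),
            pvC_cons l ls b]
        split_ifs <;> omega

-- rank-r counts are counts of the literal key
lemma pvC_eq_count (ls : List String) (k : String) (r : Int)
    (hk : pvRank k = r)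
    (hinj : ∀ l : String, pvRank l = r → l = k) :
    pvC ls r = (ls.count k : Int) := by
  simp only [pvC, List.count]
  congr 1
  apply List.countP_congr
  intro l _
  constructor
  · intro h
    simp only [decide_eq_true_eq] at h
    simp [hinj l h]
  · intro h
    simp only [beq_iff_eq] at h
    subst h
    simp [hk]

lemma pvRank_eq_four (l : String) (h : pvRank l = 4) : l = "Critical" := by
  unfold pvRank at h
  split_ifs at h <;> simp_all

lemma pvRank_eq_three (l : String) (h : pvRank l = 3) : l = "High" := by
  unfold pvRank at h
  split_ifs at h <;> simp_all

lemma pvRank_eq_two (l : String) (h : pvRank l = 2) : l = "Medium" := by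
  unfold pvRank at h
  split_ifs at h <;> simp_all

lemma pvRank_eq_one (l : String) (h : pvRank l = 1) : l = "Low" := by
  unfold pvRank at h
  split_ifs at h <;> simp_all

-- A's counting loop: a non-"Info" original key ends at its start value plus its occurrences
lemma pv_loop_getD (ls : List String) (d : PySem.Dict String Int) (k : String)
    (hinfo : d.contains "Info" = true) (hk : d.contains k = true) (hne : k ≠ "Info") :
    (ls.foldl
      (fun d level =>
        if d.contains level then d.modify level 0 (fun v => v + 1)
        else d.modify "Info" 0 (fun v => v + 1)) d).getD k 0
      = d.getD k 0 + (ls.count k : Int) := by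
  induction ls generalizing d with
  | nil => simp
  | cons l ls ih =>
    simp only [List.foldl_cons]
    by_cases hl : d.contains l = true
    · rw [if_pos hl]
      rw [ih (d.modify l 0 (fun v => v + 1))
            (by simp [PySem.Dict.contains_modify, hinfo])
            (by simp [PySem.Dict.contains_modify, hk])]
      rw [PySem.Dict.getD_modify]
      by_cases hkl : k = l
      · subst hkl
        simp
        omega
      · rw [if_neg hkl]
        have : (l :: ls).count k = ls.count k := by
          simp [Ne.symm hkl]
        rw [this]
    · rw [if_neg hl]
      have hlk : l ≠ k := by
        intro h; subst h; exact hl hk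
      rw [ih (d.modify "Info" 0 (fun v => v + 1))
            (by simp [PySem.Dict.contains_modify, hinfo])
            (by simp [PySem.Dict.contains_modify, hk])]
      rw [PySem.Dict.getD_modify, if_neg hne]
      have : (l :: ls).count k = ls.count k := by
        simp [hlk]
      rw [this]

-- ===== VERDICT (by name: the statement is the Claim_ definition above) =====
theorem calculate_host_risk_from_levels_spec : Claim_equal_calculate_host_risk_from_levels := by
  intro rl _
  unfold Spec_calculate_host_risk_from_levels
  by_cases h : rl = []
  · subst h; decide
  · unfold calculate_host_risk_from_levels calculate_host_risk_from_levels_alt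
    rw [if_neg h, pv_fold_char rl 0 0 le_rfl]
    have hM0 := pvM_nonneg rl
    have hM4 := pvM_le_four rl
    have hCpos := pvC_pos_of_ne_nil rl h
    have hC := pv_loop_getD rl pvInitDict "Critical" (by decide) (by decide) (by decide)
    have hH := pv_loop_getD rl pvInitDict "High" (by decide) (by decide) (by decide)
    have hMd := pv_loop_getD rl pvInitDict "Medium" (by decide) (by decide) (by decide)
    have hL := pv_loop_getD rl pvInitDict "Low" (by decide) (by decide) (by decide)
    simp only [hC, hH, hMd, hL,
      show pvInitDict.getD "Critical" 0 = 0 from by decide,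
      show pvInitDict.getD "High" 0 = 0 from by decide,
      show pvInitDict.getD "Medium" 0 = 0 from by decide,
      show pvInitDict.getD "Low" 0 = 0 from by decide, zero_add,
      show max (0:Int) (pvM rl) = pvM rl from by omega]
    rw [← pvC_eq_count rl "Critical" 4 (by decide) pvRank_eq_four,
        ← pvC_eq_count rl "High" 3 (by decide) pvRank_eq_three,
        ← pvC_eq_count rl "Medium" 2 (by decide) pvRank_eq_two,
        ← pvC_eq_count rl "Low" 1 (by decide) pvRank_eq_one]
    have hcase : pvM rl = 0 ∨ pvM rl = 1 ∨ pvM rl = 2 ∨ pvM rl = 3 ∨ pvM rl = 4 := by omega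
    rcases hcase with hMv | hMv | hMv | hMv | hMv <;> rw [hMv] at hCpos ⊢
    · rw [pvC_zero_of_gt rl 4 (by omega), pvC_zero_of_gt rl 3 (by omega),
          pvC_zero_of_gt rl 2 (by omega), pvC_zero_of_gt rl 1 (by omega)]
      norm_num
    · rw [pvC_zero_of_gt rl 4 (by omega), pvC_zero_of_gt rl 3 (by omega),
          pvC_zero_of_gt rl 2 (by omega)]
      rw [if_neg (show ¬ (0:Int) > 0 from by omega), if_neg (show ¬ (0:Int) > 0 from by omega),
          if_neg (show ¬ (0:Int) > 0 from by omega), if_pos hCpos]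
      norm_num [show PySem.List.pyGet? pvTiers (0:Int) = some (30, 1, 59, "低危") from by decide]
    · rw [pvC_zero_of_gt rl 4 (by omega), pvC_zero_of_gt rl 3 (by omega)]
      rw [if_neg (show ¬ (0:Int) > 0 from by omega), if_neg (show ¬ (0:Int) > 0 from by omega),
          if_pos hCpos]
      norm_num [show PySem.List.pyGet? pvTiers (1:Int) = some (60, 2, 84, "中危") from by decide]
    · rw [pvC_zero_of_gt rl 4 (by omega)]
      rw [if_neg (show ¬ (0:Int) > 0 from by omega),
          if_pos hCpos]
      norm_num [show PySem.List.pyGet? pvTiers (2:Int) = some (85, 3, 99, "高危") from by decide]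
    · rw [if_pos hCpos]
      norm_num [show PySem.List.pyGet? pvTiers (3:Int) = some (100, 0, 100, "超危") from by decide]
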